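-- pv_equiv track=rewrite | github.com/dyeonss/algorithm_study | 프로그래머스/1/64061. 크레인 인형뽑기 게임/크레인 인형뽑기 게임.py | solution
-- ===== SOURCE A (Python) =====
-- def solution(board, moves):
--     answer = 0
--     basket=[]
--     loc=[len(board)]*len(board)
--
--     for c in range(len(board)):
--         for r in range(len(board)):
--             if board[r][c]!=0:
--                 loc[c]=r
--                 break
--
--     for move in moves:
--         if loc[move-1]>=len(board):
--             continue
--         elif board[loc[move-1]][move-1]!=0:
--             if len(basket)>0 and basket[-1]==board[loc[move-1]][move-1]:
--                 basket.pop()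
--                 answer+=2
--             else:
--                 basket.append(board[loc[move-1]][move-1])
--             loc[move-1]+=1
--
--     return answer
-- ===== SOURCE B (Python) =====
-- def solution(board, moves):
--     n = len(board)
--     # reduce each column to the run of dolls the crane can reach (top air skipped)
--     cols = []
--     for c in range(n):
--         col = [row[c] for row in board]
--         while col and col[0] == 0:
--             col = col[1:]
--         run = []
--         for v in col:
--             if v == 0:
--                 break
--             run.append(v)
--         cols.append(run)
--     basket = []
--     score = 0
--     for m in moves:
--         run = cols[m - 1]
--         if run:
--             doll = run[0]
--             cols[m - 1] = run[1:]
--             if basket and basket[-1] == doll: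
--                 basket.pop()
--                 score += 2
--             else:
--                 basket.append(doll)
--     return score
-- ===== Notes on version B (the rewrite author's own statement) =====
-- stated objective: alternative
-- what changed: B precomputes, per column, the explicit stack of reachable dolls (skip the leading air, take the contiguous nonzero run) and pops from these stacks, instead of A's per-column row pointer into the board that is re-dereferenced on every move.
-- outside the precondition, e.g. on solution([[1]], [2]): A raises IndexError, B raises IndexError; on solution([[1], [2, 3]], [1]): A raises IndexError, B raises IndexError; on solution([[0, 5, 5], [5, 5, 9]], [0, 0]): A returns 0, B returns 2
import Mathlib
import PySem

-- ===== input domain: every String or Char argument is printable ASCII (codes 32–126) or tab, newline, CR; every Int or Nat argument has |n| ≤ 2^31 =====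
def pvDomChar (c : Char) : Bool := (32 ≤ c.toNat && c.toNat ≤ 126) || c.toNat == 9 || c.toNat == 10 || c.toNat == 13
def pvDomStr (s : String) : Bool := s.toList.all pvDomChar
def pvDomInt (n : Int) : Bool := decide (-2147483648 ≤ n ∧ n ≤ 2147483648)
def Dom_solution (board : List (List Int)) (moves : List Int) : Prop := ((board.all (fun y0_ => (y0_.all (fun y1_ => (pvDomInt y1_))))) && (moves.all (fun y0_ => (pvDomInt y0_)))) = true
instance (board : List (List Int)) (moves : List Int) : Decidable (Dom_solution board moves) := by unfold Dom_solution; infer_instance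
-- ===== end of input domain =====

-- B keeps per-column stacks of the reachable dolls instead of A's row pointers into the board (alternative data structure, same cost).

-- ===== PORT A =====
-- loop body of A's move loop: re-reads the board at (loc[move-1], move-1) and advances the row pointer
def pvStepA (board : List (List Int)) (st : List Int × List Int × Int) (move : Int) :
    List Int × List Int × Int :=
  let loc := st.1
  let basket := st.2.1
  let answer := st.2.2
  let p := PySem.List.pyGetD loc (move - 1) 0
  if (board.length : Int) ≤ p then st
  else
    let d := PySem.List.pyGetD (PySem.List.pyGetD board p []) (move - 1) 0
    if d ≠ 0 then
      if basket ≠ [] ∧ PySem.List.pyGetD basket (-1) 0 = d then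
        (PySem.List.pySetD loc (move - 1) (p + 1), basket.dropLast, answer + 2)
      else
        (PySem.List.pySetD loc (move - 1) (p + 1), basket ++ [d], answer)
    else st

-- literal port of A: loc[c] = first nonzero row of column c (else n; the inner loop-with-break is find?)
def solution (board : List (List Int)) (moves : List Int) : Int :=
  let n := board.length
  let loc0 : List Int := List.replicate n (n : Int)
  let loc1 := (PySem.List.pyRange 0 (n : Int) 1).foldl (fun loc c =>
    match (PySem.List.pyRange 0 (n : Int) 1).find?
        (fun r => PySem.List.pyGetD (PySem.List.pyGetD board r []) c 0 != 0) with
    | some r => PySem.List.pySetD loc c r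
    | none => loc) loc0
  (moves.foldl (pvStepA board) (loc1, ([], 0))).2.2

-- ===== PORT B =====
-- loop body of B's move loop: pops the top of the precomputed column stack
def pvStepB (st : List (List Int) × List Int × Int) (m : Int) :
    List (List Int) × List Int × Int :=
  let cols := st.1
  let basket := st.2.1
  let score := st.2.2
  match PySem.List.pyGetD cols (m - 1) [] with
  | [] => st
  | doll :: rest =>
    let cols' := PySem.List.pySetD cols (m - 1) rest
    if basket ≠ [] ∧ PySem.List.pyGetD basket (-1) 0 = doll then
      (cols', basket.dropLast, score + 2)
    else
      (cols', basket ++ [doll], score)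

-- literal port of Source B: build per-column stacks once (drop leading zeros, take the nonzero run), then pop from them
def solution_alt (board : List (List Int)) (moves : List Int) : Int :=
  let n := board.length
  let cols0 : List (List Int) := (PySem.List.pyRange 0 (n : Int) 1).map (fun c =>
    ((board.map (fun row => PySem.List.pyGetD row c 0)).dropWhile (fun v => v == 0)).takeWhile
      (fun v => v != 0))
  (moves.foldl pvStepB (cols0, ([], 0))).2.2

-- ===== PRECONDITION & SPEC =====
-- Pre_ excludes exactly (a) boards with a row shorter than len(board), where A raises IndexError;
-- (b) moves whose index m-1 falls outside Python's wrap range [-n, n), where A raises IndexError;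
-- (c) non-positive moves combined with a row longer than len(board), where A's negative-index
-- wraparound row[m-1] reads a cell outside the n×n grid (an accident of Python list indexing).
def Pre_solution (board : List (List Int)) (moves : List Int) : Prop :=
  (∀ row ∈ board, board.length ≤ row.length) ∧
  (∀ m ∈ moves, (-(board.length : Int) ≤ m - 1 ∧ m - 1 < (board.length : Int)) ∧
    (m - 1 < 0 → ∀ row ∈ board, row.length = board.length))
instance (board : List (List Int)) (moves : List Int) : Decidable (Pre_solution board moves) := by
  unfold Pre_solution; infer_instance

def pvWitness_solution : List (List Int) × List Int := ([[0, 3], [2, 3]], [1, 2, 2, 1])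

def Spec_solution (board : List (List Int)) (moves : List Int) (out : Int) : Prop := out = solution_alt board moves
instance (board : List (List Int)) (moves : List Int) (out : Int) : Decidable (Spec_solution board moves out) := by unfold Spec_solution; infer_instance

-- ===== CLAIM (what is proved, stated in full; the proofs are below) =====
def Claim_equal_solution : Prop := ∀ (board : List (List Int)) (moves : List Int), Dom_solution board moves → Pre_solution board moves → Spec_solution board moves (solution board moves)

-- ===== LEMMAS AND PROOFS =====

-- Python's wrapped index for -n ≤ i < n
def pvWrap (n : Nat) (i : Int) : Nat := if 0 ≤ i then i.toNat else n - (-i).toNat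

lemma pvWrap_lt {n : Nat} {i : Int} (h1 : -(n : Int) ≤ i) (h2 : i < (n : Int)) :
    pvWrap n i < n := by
  unfold pvWrap; split_ifs <;> omega

lemma pvIdx_wrap {n : Nat} {i : Int} (h1 : -(n : Int) ≤ i) (h2 : i < (n : Int)) :
    PySem.List.pyIdx? n i = some (pvWrap n i) := by
  simp only [PySem.List.pyIdx?, pvWrap]
  split_ifs <;> simp_all

lemma pvGetD_wrap {α : Type} (xs : List α) (i : Int) (d : α)
    (h1 : -(xs.length : Int) ≤ i) (h2 : i < (xs.length : Int)) :
    PySem.List.pyGetD xs i d = xs.getD (pvWrap xs.length i) d := by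
  simp only [PySem.List.pyGetD, PySem.List.pyGet?, pvIdx_wrap h1 h2, Option.bind_some,
    List.getD_eq_getElem?_getD]

lemma pvSetD_wrap {α : Type} (xs : List α) (i : Int) (v : α)
    (h1 : -(xs.length : Int) ≤ i) (h2 : i < (xs.length : Int)) :
    PySem.List.pySetD xs i v = xs.set (pvWrap xs.length i) v := by
  simp only [PySem.List.pySetD, PySem.List.pySet?, pvIdx_wrap h1 h2, Option.map_some,
    Option.getD_some]

lemma pvGetD_set {α : Type} (l : List α) (i j : Nat) (v d : α) :
    (l.set i v).getD j d = if i = j ∧ i < l.length then v else l.getD j d := by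
  simp only [List.getD_eq_getElem?_getD, List.getElem?_set]
  split_ifs with h1 h2 h3 <;> simp_all
  omega

lemma pvFind?_congr {α : Type} (p q : α → Bool) :
    ∀ (l : List α), (∀ x ∈ l, p x = q x) → l.find? p = l.find? q := by
  intro l
  induction l with
  | nil => intro _; rfl
  | cons x xs ih =>
    intro h
    simp only [List.find?_cons, h x (by simp)]
    cases q x
    · exact ih (fun y hy => h y (by simp [hy]))
    · rfl

-- column c of the board, as B reads it
def pvCol (board : List (List Int)) (c : Nat) : List Int :=
  board.map (fun row => PySem.List.pyGetD row (c : Int) 0)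

-- first nonzero index of a column, as A's inner loop computes it
def pvF (l : List Int) : Option Nat :=
  (List.range l.length).find? (fun r => l.getD r 0 != 0)

lemma pvF_cons (x : Int) (xs : List Int) :
    pvF (x :: xs) = if x != 0 then some 0 else (pvF xs).map (· + 1) := by
  unfold pvF
  simp only [List.length_cons, List.range_succ_eq_map, List.find?_cons]
  cases hx : (x != 0)
  · simp only [List.getD_cons_zero, hx, List.find?_map]
    rfl
  · simp [hx]

lemma pvF_lt {l : List Int} {r : Nat} (h : pvF l = some r) : r < l.length := by
  have hm := List.mem_of_find?_eq_some h
  simpa using List.mem_range.mp (by simpa using hm)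

lemma pvF_run (l : List Int) :
    (match pvF l with
     | some r => (l.drop r).takeWhile (fun v => v != 0)
     | none => ([] : List Int)) =
    (l.dropWhile (fun v => v == 0)).takeWhile (fun v => v != 0) := by
  induction l with
  | nil => simp [pvF]
  | cons x xs ih =>
    rw [pvF_cons]
    by_cases hx : x = 0
    · subst hx
      simp only [List.dropWhile_cons]
      norm_num
      cases h : pvF xs with
      | none => simpa [h] using ih
      | some r => simpa [h] using ih
    · simp [hx]

-- main invariant between A's loc list and B's cols list
def pvInv (board : List (List Int)) (loc : List Int) (cols : List (List Int)) : Prop :=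
  loc.length = board.length ∧ cols.length = board.length ∧
  ∀ j : Nat, j < board.length → ∃ p : Nat,
    loc.getD j 0 = (p : Int) ∧ p ≤ board.length ∧
    cols.getD j [] = ((pvCol board j).drop p).takeWhile (fun v => v != 0)

-- relation between the full loop states
def pvRel (board : List (List Int)) (sa : List Int × List Int × Int)
    (sb : List (List Int) × List Int × Int) : Prop :=
  pvInv board sa.1 sb.1 ∧ sa.2 = sb.2

lemma pvCol_length (board : List (List Int)) (c : Nat) :
    (pvCol board c).length = board.length := by simp [pvCol]

lemma pvStep_rel (board : List (List Int)) (sa : List Int × List Int × Int)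
    (sb : List (List Int) × List Int × Int) (m : Int)
    (hsq : ∀ row ∈ board, board.length ≤ row.length)
    (hm : -(board.length : Int) ≤ m - 1 ∧ m - 1 < (board.length : Int))
    (hneg : m - 1 < 0 → ∀ row ∈ board, row.length = board.length)
    (h : pvRel board sa sb) : pvRel board (pvStepA board sa m) (pvStepB sb m) := by
  obtain ⟨⟨hla, hlb, hinv⟩, h2⟩ := h
  set n := board.length with hn
  set j := pvWrap n (m - 1) with hj
  have hjn : j < n := pvWrap_lt hm.1 hm.2
  obtain ⟨p, hp, hpn, hrun⟩ := hinv j hjn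
  set col := pvCol board j with hcol
  have hcl : col.length = n := pvCol_length board j
  have hget : PySem.List.pyGetD sa.1 (m - 1) 0 = (p : Int) := by
    rw [pvGetD_wrap sa.1 (m - 1) 0 (by rw [hla]; exact hm.1) (by rw [hla]; exact_mod_cast hm.2)]
    rw [hla]; exact hp
  have hgetb : PySem.List.pyGetD sb.1 (m - 1) [] = (col.drop p).takeWhile (fun v => v != 0) := by
    rw [pvGetD_wrap sb.1 (m - 1) [] (by rw [hlb]; exact hm.1) (by rw [hlb]; exact_mod_cast hm.2)]
    rw [hlb]; exact hrun
  simp only [pvStepA, pvStepB]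
  rw [hget, hgetb]
  by_cases hpe : p = n
  · -- pointer past the board: both sides skip
    have hdrop : col.drop p = [] := List.drop_eq_nil_of_le (by omega)
    rw [hdrop]
    simp only [List.takeWhile_nil]
    rw [if_pos (by exact_mod_cast Nat.le_of_eq hpe.symm)]
    exact ⟨⟨hla, hlb, hinv⟩, h2⟩
  · have hplt : p < n := lt_of_le_of_ne hpn hpe
    rw [if_neg (by omega)]
    have hrow : PySem.List.pyGetD board (p : Int) [] = board[p]'(by omega) := by
      rw [PySem.List.pyGetD_natCast, List.getD_eq_getElem?_getD, List.getElem?_eq_getElem (by omega)]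
      rfl
    have hrlen : n ≤ (board[p]'(by omega) : List Int).length := hsq _ (List.getElem_mem _)
    have hcolp : col[p]'(by omega) = (board[p]'(by omega)).getD j 0 := by
      simp only [hcol, pvCol, List.getElem_map, PySem.List.pyGetD_natCast]
    have hw : pvWrap (board[p]'(by omega) : List Int).length (m - 1) = j := by
      by_cases h0 : 0 ≤ m - 1
      · rw [hj]; simp only [pvWrap, if_pos h0]
      · rw [hneg (by omega) _ (List.getElem_mem _), hn]
    have hd : PySem.List.pyGetD (PySem.List.pyGetD board (p : Int) []) (m - 1) 0
        = col[p]'(by omega) := by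
      rw [hrow, pvGetD_wrap _ (m - 1) 0 (by omega) (by omega), hw]
      exact hcolp.symm
    rw [hd]
    have hdropc : col.drop p = col[p]'(by omega) :: col.drop (p + 1) :=
      List.drop_eq_getElem_cons (by omega)
    rw [hdropc, List.takeWhile_cons]
    by_cases hz : col[p]'(by omega) = 0
    · -- zero under the pointer: both sides skip
      simp only [hz]
      norm_num
      exact ⟨⟨hla, hlb, hinv⟩, h2⟩
    · rw [if_pos hz]
      have hbne : (col[p]'(by omega) != 0) = true := by simpa using hz
      rw [hbne, if_pos rfl]
      dsimp only
      -- both sides advance column j and do the same basket update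
      have hseta : PySem.List.pySetD sa.1 (m - 1) ((p : Int) + 1) = sa.1.set j ((p : Int) + 1) := by
        rw [pvSetD_wrap sa.1 (m - 1) _ (by rw [hla]; exact hm.1) (by rw [hla]; exact_mod_cast hm.2), hla]
      have hsetb : PySem.List.pySetD sb.1 (m - 1) (List.takeWhile (fun v => v != 0) (col.drop (p + 1)))
          = sb.1.set j (List.takeWhile (fun v => v != 0) (col.drop (p + 1))) := by
        rw [pvSetD_wrap sb.1 (m - 1) _ (by rw [hlb]; exact hm.1) (by rw [hlb]; exact_mod_cast hm.2), hlb]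
      have hinv' : pvInv board (sa.1.set j ((p : Int) + 1))
          (sb.1.set j (List.takeWhile (fun v => v != 0) (col.drop (p + 1)))) := by
        refine ⟨by simpa using hla, by simpa using hlb, fun j' hj' => ?_⟩
        by_cases hjj : j = j'
        · subst hjj
          refine ⟨p + 1, ?_, by omega, ?_⟩
          · rw [pvGetD_set]; rw [if_pos ⟨rfl, by omega⟩]; push_cast; ring
          · rw [pvGetD_set]; rw [if_pos ⟨rfl, by omega⟩]
        · obtain ⟨q, h1, h3, h4⟩ := ‹∀ j : Nat, j < board.length → _› j' hj'
          refine ⟨q, ?_, h3, ?_⟩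
          · rw [pvGetD_set, if_neg (by tauto)]; exact h1
          · rw [pvGetD_set, if_neg (by tauto)]; exact h4
      rw [h2, hseta, hsetb]
      by_cases hb : sb.2.1 ≠ [] ∧ PySem.List.pyGetD sb.2.1 (-1) 0 = col[p]'(by omega)
      · rw [if_pos hb, if_pos hb]
        exact ⟨hinv', rfl⟩
      · rw [if_neg hb, if_neg hb]
        exact ⟨hinv', rfl⟩

lemma pvLoop (board : List (List Int))
    (hsq : ∀ row ∈ board, board.length ≤ row.length) :
    ∀ (moves : List Int),
    (∀ m ∈ moves, (-(board.length : Int) ≤ m - 1 ∧ m - 1 < (board.length : Int)) ∧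
      (m - 1 < 0 → ∀ row ∈ board, row.length = board.length)) →
    ∀ sa sb, pvRel board sa sb →
    pvRel board (moves.foldl (pvStepA board) sa) (moves.foldl pvStepB sb) := by
  intro moves
  induction moves with
  | nil => intro _ sa sb h; exact h
  | cons m ms ih =>
    intro hmv sa sb h
    simp only [List.foldl_cons]
    exact ih (fun x hx => hmv x (by simp [hx]))
      _ _ (pvStep_rel board sa sb m hsq (hmv m (by simp)).1 (hmv m (by simp)).2 h)

lemma pvFoldl_ext {α β : Type} (f g : α → β → α) (hfg : ∀ a b, f a b = g a b) :
    ∀ (l : List β) (init : α), l.foldl f init = l.foldl g init := by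
  intro l
  induction l with
  | nil => intro _; rfl
  | cons x xs ih => intro init; rw [List.foldl_cons, List.foldl_cons, hfg, ih]

-- initial loc loop: after the fold, position j holds (match h j with some r => r | none => old)
lemma pvFold_set (h : Nat → Option Int) :
    ∀ (k : Nat) (loc : List Int), k ≤ loc.length →
    ((List.range k).foldl (fun loc c => match h c with | some r => loc.set c r | none => loc) loc).length
        = loc.length ∧
    ∀ j : Nat, ((List.range k).foldl (fun loc c => match h c with | some r => loc.set c r | none => loc) loc).getD j 0
        = if j < k then (match h j with | some r => r | none => loc.getD j 0) else loc.getD j 0 := by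
  intro k
  induction k with
  | zero => intro loc _; simp
  | succ k ih =>
    intro loc hk
    obtain ⟨ihl, ihg⟩ := ih loc (by omega)
    rw [List.range_succ, List.foldl_append, List.foldl_cons, List.foldl_nil]
    constructor
    · cases h k <;> simp [ihl]
    · intro j
      cases hhk : h k with
      | none =>
        rw [ihg j]
        by_cases hjk : j = k
        · subst hjk; rw [if_neg (by omega), if_pos (by omega), hhk]
        · split_ifs <;> first | rfl | omega
      | some r =>
        rw [pvGetD_set, ihl, ihg j]
        by_cases hjk : j = k
        · subst hjk
          rw [if_pos ⟨rfl, by omega⟩, if_pos (by omega), hhk]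
        · rw [if_neg (by tauto)]
          split_ifs <;> first | rfl | omega

lemma pvMatch_set (loc : List Int) (c : Nat) (o : Option Int) :
    (match o with
     | some r => PySem.List.pySetD loc ((c : Nat) : Int) r
     | none => loc)
    = match o with
      | some r => loc.set c r
      | none => loc := by
  cases o with
  | none => rfl
  | some r => exact PySem.List.pySetD_natCast _ _ _

-- A's inner find, per column index
def pvH (board : List (List Int)) (c : Nat) : Option Int :=
  (PySem.List.pyRange 0 (board.length : Int) 1).find?
    (fun r => PySem.List.pyGetD (PySem.List.pyGetD board r []) ((c : Int)) 0 != 0)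

lemma pvInit_find (board : List (List Int)) (j : Nat) :
    pvH board j = (pvF (pvCol board j)).map (fun r : Nat => (r : Int)) := by
  unfold pvH
  rw [PySem.List.pyRange_zero_nat, List.find?_map]
  unfold pvF
  rw [pvCol_length]
  congr 1
  apply pvFind?_congr
  intro r hr
  have hrn : r < board.length := List.mem_range.mp hr
  simp only [Function.comp]
  have hrow : PySem.List.pyGetD board (r : Int) [] = board[r] := by
    rw [PySem.List.pyGetD_natCast, List.getD_eq_getElem?_getD, List.getElem?_eq_getElem hrn]
    rfl
  rw [hrow]
  have : (pvCol board j).getD r 0 = PySem.List.pyGetD board[r] ((j : Int)) 0 := by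
    rw [pvCol, List.getD_eq_getElem?_getD, List.getElem?_map, List.getElem?_eq_getElem hrn]
    rfl
  rw [this]

lemma pvInv_init (board : List (List Int)) :
    pvInv board
      ((PySem.List.pyRange 0 (board.length : Int) 1).foldl (fun loc c =>
        match (PySem.List.pyRange 0 (board.length : Int) 1).find?
            (fun r => PySem.List.pyGetD (PySem.List.pyGetD board r []) c 0 != 0) with
        | some r => PySem.List.pySetD loc c r
        | none => loc) (List.replicate board.length ((board.length : Int))))
      ((PySem.List.pyRange 0 (board.length : Int) 1).map (fun c =>
        ((board.map (fun row => PySem.List.pyGetD row c 0)).dropWhile (fun v => v == 0)).takeWhile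
          (fun v => v != 0))) := by
  have hfold : (PySem.List.pyRange 0 (board.length : Int) 1).foldl (fun loc c =>
      match (PySem.List.pyRange 0 (board.length : Int) 1).find?
          (fun r => PySem.List.pyGetD (PySem.List.pyGetD board r []) c 0 != 0) with
      | some r => PySem.List.pySetD loc c r
      | none => loc) (List.replicate board.length ((board.length : Int)))
      = (List.range board.length).foldl
          (fun loc c => match pvH board c with | some r => loc.set c r | none => loc)
          (List.replicate board.length ((board.length : Int))) := by
    rw [PySem.List.pyRange_zero_nat, List.foldl_map]
    apply pvFoldl_ext
    intro loc c
    rw [← PySem.List.pyRange_zero_nat]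
    exact pvMatch_set loc c _
  rw [hfold]
  obtain ⟨hlen, hget⟩ := pvFold_set (pvH board) board.length
    (List.replicate board.length ((board.length : Int))) (by simp)
  refine ⟨by simpa using hlen, by simp, fun j hj => ?_⟩
  have hfj := pvInit_find board j
  have hcols : ((PySem.List.pyRange 0 (board.length : Int) 1).map (fun c =>
      ((board.map (fun row => PySem.List.pyGetD row c 0)).dropWhile (fun v => v == 0)).takeWhile
        (fun v => v != 0))).getD j []
      = ((pvCol board j).dropWhile (fun v => v == 0)).takeWhile (fun v => v != 0) := by
    rw [PySem.List.pyRange_zero_nat, List.map_map, List.getD_eq_getElem?_getD,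
      List.getElem?_map, List.getElem?_range hj]
    rfl
  have hrepl : (List.replicate board.length ((board.length : Int))).getD j 0
      = ((board.length : Nat) : Int) := by
    rw [List.getD_eq_getElem?_getD, List.getElem?_replicate, if_pos hj]
    rfl
  cases hf : pvF (pvCol board j) with
  | some r =>
    refine ⟨r, ?_, ?_, ?_⟩
    · rw [hget j, if_pos hj, hfj, hf]; rfl
    · have := pvF_lt hf; rw [pvCol_length] at this; omega
    · rw [hcols, ← pvF_run (pvCol board j), hf]
  | none =>
    refine ⟨board.length, ?_, le_refl board.length, ?_⟩
    · rw [hget j, if_pos hj, hfj, hf, hrepl]; rfl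
    · rw [hcols, ← pvF_run (pvCol board j), hf]
      rw [List.drop_eq_nil_of_le (by rw [pvCol_length])]
      rfl

-- ===== VERDICT (by name: the statement is the Claim_ definition above) =====
theorem solution_spec : Claim_equal_solution := by
  intro board moves _ hpre
  obtain ⟨hsq, hmv⟩ := hpre
  unfold Spec_solution
  simp only [solution, solution_alt]
  refine congrArg Prod.snd (pvLoop board hsq moves hmv _ _ ⟨pvInv_init board, ?_⟩).2
  rfl
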